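-- pv_equiv track=rewrite | github.com/aljaz2008/network_topology_visualizer | tester.py | check_bidirectional
-- ===== SOURCE A (Python) =====
-- def check_bidirectional(slovar):
--     errors = []
--     for device, props in slovar.items():
--         for port, connected_device in props.items():
--             if port == "Type" or port == "IP":
--                 continue
--             if connected_device not in slovar:
--                 errors.append(f"Device '{device}' (port '{port}') is connected to unknown device '{connected_device}'.")
--                 continue
--             # Check if the reverse connection exists
--             reverse_found = False
--             for rev_port, rev_connected in slovar[connected_device].items():
--                 if rev_port == "Type" or rev_port == "IP":
--                     continue
--                 if rev_connected == device:
--                     reverse_found = True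
--                     break
--             if not reverse_found:
--                 errors.append(
--                     f"Device '{device}' (port '{port}') is connected to '{connected_device}', "
--                     f"but '{connected_device}' does not have a connection back to '{device}'."
--                 )
--     return errors
-- ===== SOURCE B (Python) =====
-- def check_bidirectional(slovar):
--     # Flatten the topology into a flat list of directed edges (comprehension,
--     # skipping the 'Type'/'IP' metadata keys).
--     edges = [(d, p, c)
--              for d, props in slovar.items()
--              for p, c in props.items()
--              if p != "Type" and p != "IP"]
--     # Global set algebra: the one-way pairs are the directed (device, neighbour)
--     # pairs whose swapped pair is absent — computed ONCE by a set difference,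
--     # with no per-edge reverse search at all.
--     pairs = {(d, c) for d, _, c in edges}
--     one_way = pairs - {(c, d) for d, c in pairs}
--     # Single flat reporting pass over the precomputed edge list.
--     errors = []
--     for d, p, c in edges:
--         if c not in slovar:
--             errors.append(f"Device '{d}' (port '{p}') is connected to unknown device '{c}'.")
--         elif (d, c) in one_way:
--             errors.append(
--                 f"Device '{d}' (port '{p}') is connected to '{c}', "
--                 f"but '{c}' does not have a connection back to '{d}'."
--             )
--     return errors
-- ===== Notes on version B (the rewrite author's own statement) =====
-- stated objective: alternative
-- what changed: Instead of searching the neighbour's port list for a reverse edge per outgoing edge, B flattens the topology into an edge list, computes the complete set of one-way (unreciprocated) directed pairs once by set algebra (pairs minus the set of swapped pairs), and then emits the identical messages in one flat pass that only consults that precomputed difference set.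
import Mathlib
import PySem

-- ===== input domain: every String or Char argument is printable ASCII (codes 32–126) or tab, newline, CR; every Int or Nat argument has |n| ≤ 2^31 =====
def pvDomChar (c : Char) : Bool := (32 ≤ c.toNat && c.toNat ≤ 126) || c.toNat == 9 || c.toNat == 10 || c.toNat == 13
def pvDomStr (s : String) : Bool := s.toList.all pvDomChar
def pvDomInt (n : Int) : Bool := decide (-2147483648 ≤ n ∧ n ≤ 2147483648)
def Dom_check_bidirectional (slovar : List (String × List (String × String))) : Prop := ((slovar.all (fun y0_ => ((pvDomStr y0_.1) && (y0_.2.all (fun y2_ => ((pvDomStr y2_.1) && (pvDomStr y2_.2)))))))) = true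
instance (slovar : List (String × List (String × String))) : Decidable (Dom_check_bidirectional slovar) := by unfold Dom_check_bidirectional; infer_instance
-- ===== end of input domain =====

-- B replaces A's per-edge reverse scan by set algebra: it computes the full set of
-- one-way directed pairs once (pairs minus swapped pairs) and reports in one flat pass.

-- shared message text (the identical f-strings of both Pythons)
def pvMsgUnknown (device port cd : String) : String :=
  "Device '" ++ device ++ "' (port '" ++ port ++ "') is connected to unknown device '" ++ cd ++ "'."
def pvMsgNoBack (device port cd : String) : String :=
  "Device '" ++ device ++ "' (port '" ++ port ++ "') is connected to '" ++ cd ++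
    "', but '" ++ cd ++ "' does not have a connection back to '" ++ device ++ "'."

-- ===== PORT A =====
def check_bidirectional (slovar : List (String × List (String × String))) : List String :=
  slovar.foldl (fun errors dp =>
    dp.2.foldl (fun errors pc =>
      if pc.1 == "Type" || pc.1 == "IP" then errors
      else
        match (PySem.Dict.mk slovar).get? pc.2 with
        | none => errors ++ [pvMsgUnknown dp.1 pc.1 pc.2]
        | some props2 =>
          let reverse_found := props2.foldl (fun found rp =>
            if found then found
            else if rp.1 == "Type" || rp.1 == "IP" then found
            else if rp.2 == dp.1 then true else found) false
          if reverse_found then errors else errors ++ [pvMsgNoBack dp.1 pc.1 pc.2]) errors) []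

-- ===== PORT B =====
def check_bidirectional_alt (slovar : List (String × List (String × String))) : List String :=
  -- edges comprehension
  let edges := slovar.flatMap (fun dp => dp.2.flatMap (fun pc =>
    if pc.1 != "Type" && pc.1 != "IP" then [(dp.1, pc.1, pc.2)] else []))
  -- pairs = {(d, c) for d, _, c in edges}
  let pairs := PySem.Set.ofList (edges.map (fun e => (e.1, e.2.2)))
  -- one_way = pairs - {(c, d) for d, c in pairs}
  let one_way := PySem.Set.diff pairs
    (PySem.Set.ofList ((pairs : List (String × String)).map (fun x => (x.2, x.1))))
  -- single flat reporting pass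
  edges.foldl (fun errors e =>
    if !(PySem.Dict.mk slovar).contains e.2.2 then
      errors ++ [pvMsgUnknown e.1 e.2.1 e.2.2]
    else if PySem.Set.contains one_way (e.1, e.2.2) then
      errors ++ [pvMsgNoBack e.1 e.2.1 e.2.2]
    else errors) []

-- ===== PRECONDITION & SPEC =====
-- Pre_ requires the top-level device keys to be distinct. A Python dict can never carry a duplicate
-- key, so this excludes no input of the Python programs; it only rules out the duplicate-keyed
-- association lists of the Lean encoding, on which A's first-match lookup and B's global pair set differ.
def Pre_check_bidirectional (slovar : List (String × List (String × String))) : Prop :=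
  (slovar.map Prod.fst).Nodup
instance (slovar : List (String × List (String × String))) : Decidable (Pre_check_bidirectional slovar) := by
  unfold Pre_check_bidirectional; infer_instance
def pvWitness_check_bidirectional : (List (String × List (String × String))) :=
  [("a", [("p1", "b"), ("Type", "switch")]), ("b", [("p1", "a")])]
def Spec_check_bidirectional (slovar : List (String × List (String × String))) (out : List String) : Prop := out = check_bidirectional_alt slovar
instance (slovar : List (String × List (String × String))) (out : List String) : Decidable (Spec_check_bidirectional slovar out) := by unfold Spec_check_bidirectional; infer_instance

-- ===== CLAIM (what is proved, stated in full; the proofs are below) =====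
def Claim_equal_check_bidirectional : Prop := ∀ (slovar : List (String × List (String × String))), Dom_check_bidirectional slovar → Pre_check_bidirectional slovar → Spec_check_bidirectional slovar (check_bidirectional slovar)

-- ===== LEMMAS AND PROOFS =====

-- skip test shared by both programs
def pvSkip (p : String) : Bool := p == "Type" || p == "IP"

-- per-edge emission of A
def pvEmitA (slovar : List (String × List (String × String))) (dev port cd : String) : List String :=
  match (PySem.Dict.mk slovar).get? cd with
  | none => [pvMsgUnknown dev port cd]
  | some props2 =>
    if props2.foldl (fun found rp =>
        if found then found
        else if rp.1 == "Type" || rp.1 == "IP" then found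
        else if rp.2 == dev then true else found) false
    then [] else [pvMsgNoBack dev port cd]

-- the edge list of B (exactly B's comprehension)
def pvEdges (slovar : List (String × List (String × String))) : List (String × String × String) :=
  slovar.flatMap (fun dp => dp.2.flatMap (fun pc =>
    if pc.1 != "Type" && pc.1 != "IP" then [(dp.1, pc.1, pc.2)] else []))

-- the pair list underlying B's pair set
def pvPairsL (slovar : List (String × List (String × String))) : List (String × String) :=
  (pvEdges slovar).map (fun e => (e.1, e.2.2))

-- B's one-way set, named
def pvOneWay (slovar : List (String × List (String × String))) : PySem.Set (String × String) :=
  PySem.Set.diff (PySem.Set.ofList (pvPairsL slovar))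
    (PySem.Set.ofList (((PySem.Set.ofList (pvPairsL slovar)) : List (String × String)).map (fun x => (x.2, x.1))))

-- boolean bridge: B's keep-test is the negation of the skip test
lemma pvKeep_eq (p : String) : (p != "Type" && p != "IP") = !pvSkip p := by
  simp [pvSkip, Bool.not_or, bne]

-- membership in B's pair list
lemma pvMem_pairsL (slovar : List (String × List (String × String))) (x : String × String) :
    x ∈ pvPairsL slovar ↔ ∃ dp ∈ slovar, ∃ pc ∈ dp.2, pvSkip pc.1 = false ∧ x = (dp.1, pc.2) := by
  simp only [pvPairsL, pvEdges, List.mem_map, List.mem_flatMap]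
  constructor
  · rintro ⟨e, ⟨dp, hdp, pc, hpc, he⟩, rfl⟩
    have hk : (pc.1 != "Type" && pc.1 != "IP") = true := by
      by_contra hc
      rw [if_neg hc] at he; simp at he
    rw [if_pos hk] at he
    obtain rfl := List.mem_singleton.mp he
    refine ⟨dp, hdp, pc, hpc, ?_, rfl⟩
    have := pvKeep_eq pc.1
    rw [hk] at this
    cases h : pvSkip pc.1
    · rfl
    · rw [h] at this; simp at this
  · rintro ⟨dp, hdp, pc, hpc, hs, rfl⟩
    have hk : (pc.1 != "Type" && pc.1 != "IP") = true := by rw [pvKeep_eq, hs]; rfl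
    exact ⟨(dp.1, pc.1, pc.2), ⟨dp, hdp, pc, hpc, by rw [if_pos hk]; simp⟩, rfl⟩

-- membership in B's one-way set
lemma pvMem_oneWay (slovar : List (String × List (String × String))) (x : String × String) :
    x ∈ pvOneWay slovar ↔ x ∈ pvPairsL slovar ∧ (x.2, x.1) ∉ pvPairsL slovar := by
  unfold pvOneWay
  rw [PySem.Set.mem_diff, PySem.Set.mem_ofList, PySem.Set.mem_ofList]
  constructor
  · rintro ⟨h1, h2⟩
    refine ⟨h1, fun hc => h2 ?_⟩
    exact List.mem_map.mpr ⟨(x.2, x.1), (PySem.Set.mem_ofList _ _).mpr hc, rfl⟩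
  · rintro ⟨h1, h2⟩
    refine ⟨h1, fun hc => h2 ?_⟩
    obtain ⟨y, hy, hxy⟩ := List.mem_map.mp hc
    have : y = (x.2, x.1) := by
      obtain ⟨y1, y2⟩ := y
      obtain ⟨h1', h2'⟩ := Prod.mk.injEq .. ▸ (Prod.ext_iff.mp hxy)
      simp_all
    exact (PySem.Set.mem_ofList _ _).mp (this ▸ hy)

-- first-match lookup returns a member
lemma pvGet_mem (l : List (String × List (String × String))) (k : String) (v : List (String × String))
    (h : (PySem.Dict.mk l).get? k = some v) : (k, v) ∈ l := by
  induction l with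
  | nil => simp [PySem.Dict.get?] at h
  | cons a rest ih =>
    obtain ⟨a1, a2⟩ := a
    rw [PySem.Dict.get?_mk_cons] at h
    by_cases hk : (a1 == k) = true
    · rw [if_pos hk] at h
      have h1 : a1 = k := eq_of_beq hk
      have h2 : a2 = v := Option.some.inj h
      exact h1 ▸ h2 ▸ List.mem_cons_self
    · rw [if_neg hk] at h
      exact List.mem_cons_of_mem _ (ih h)

-- under distinct keys every member with the looked-up key carries the looked-up value
lemma pvMem_get (l : List (String × List (String × String))) (k : String) (v : List (String × String))
    (hnd : (l.map Prod.fst).Nodup) (h : (k, v) ∈ l) : (PySem.Dict.mk l).get? k = some v := by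
  induction l with
  | nil => simp at h
  | cons a rest ih =>
    obtain ⟨a1, a2⟩ := a
    simp only [List.map_cons, List.nodup_cons] at hnd
    rw [PySem.Dict.get?_mk_cons]
    rcases List.mem_cons.mp h with heq | hmem
    · obtain ⟨rfl, rfl⟩ := Prod.mk.injEq .. ▸ (by exact Prod.ext_iff.mp heq.symm : a1 = k ∧ a2 = v)
      simp
    · have hk : (a1 == k) = false := by
        by_contra hc
        have hbe : a1 = k := eq_of_beq (by simpa using hc)
        exact hnd.1 (hbe ▸ (List.mem_map.mpr ⟨(k, v), hmem, rfl⟩))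
      rw [if_neg (by simp [hk])]
      exact ih hnd.2 hmem

-- one step of A's reverse scan, as an or
lemma pvStepRev (dev : String) (b : Bool) (rp : String × String) :
    (if b then b
     else if rp.1 == "Type" || rp.1 == "IP" then b
     else if rp.2 == dev then true else b) = (b || (!pvSkip rp.1 && rp.2 == dev)) := by
  cases b with
  | true => simp
  | false =>
    by_cases h1 : (rp.1 == "Type" || rp.1 == "IP") = true
    · simp [pvSkip, h1]
    · have h1' := eq_false_of_ne_true h1
      by_cases h2 : (rp.2 == dev) = true
      · simp [pvSkip, h1', h2]
      · simp [pvSkip, h1', eq_false_of_ne_true h2]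

-- A's reverse-found flag is an any
lemma pvRev_any (props : List (String × String)) (dev : String) (b : Bool) :
    props.foldl (fun found rp =>
      if found then found
      else if rp.1 == "Type" || rp.1 == "IP" then found
      else if rp.2 == dev then true else found) b =
    (b || props.any (fun rp => !pvSkip rp.1 && rp.2 == dev)) := by
  induction props generalizing b with
  | nil => simp
  | cons rp rest ih =>
    rw [List.foldl_cons, pvStepRev, ih, List.any_cons, Bool.or_assoc]

-- one step of A's outer loop body, as an append
lemma pvStepA (slovar : List (String × List (String × String))) (dev : String)
    (errors : List String) (pc : String × String) :
    (if pc.1 == "Type" || pc.1 == "IP" then errors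
     else
       match (PySem.Dict.mk slovar).get? pc.2 with
       | none => errors ++ [pvMsgUnknown dev pc.1 pc.2]
       | some props2 =>
         let reverse_found := props2.foldl (fun found rp =>
           if found then found
           else if rp.1 == "Type" || rp.1 == "IP" then found
           else if rp.2 == dev then true else found) false
         if reverse_found then errors else errors ++ [pvMsgNoBack dev pc.1 pc.2]) =
    errors ++ (if pvSkip pc.1 then [] else pvEmitA slovar dev pc.1 pc.2) := by
  cases hsk : pvSkip pc.1
  · have hsk' : (pc.1 == "Type" || pc.1 == "IP") = false := hsk
    rw [if_neg (by simp [hsk']), if_neg (by simp), pvEmitA]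
    cases hg : (PySem.Dict.mk slovar).get? pc.2 with
    | none => simp
    | some props2 =>
      simp only []
      by_cases hr : (props2.foldl (fun found rp =>
          if found then found
          else if rp.1 == "Type" || rp.1 == "IP" then found
          else if rp.2 == dev then true else found) false) = true
      · rw [if_pos hr, if_pos hr]; simp
      · have hr' := eq_false_of_ne_true hr
        rw [if_neg (by rw [hr']; simp), if_neg (by rw [hr']; simp)]
  · have hsk' : (pc.1 == "Type" || pc.1 == "IP") = true := hsk
    rw [if_pos (by simp [hsk']), if_pos (by simp)]
    simp

-- A as a flatMap over the edges
lemma pvA_flat (slovar : List (String × List (String × String))) :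
    check_bidirectional slovar = (pvEdges slovar).flatMap (fun e => pvEmitA slovar e.1 e.2.1 e.2.2) := by
  have h1 : ∀ (dev : String) (props : List (String × String)) (errors : List String),
      props.foldl (fun errors pc =>
        if pc.1 == "Type" || pc.1 == "IP" then errors
        else
          match (PySem.Dict.mk slovar).get? pc.2 with
          | none => errors ++ [pvMsgUnknown dev pc.1 pc.2]
          | some props2 =>
            let reverse_found := props2.foldl (fun found rp =>
              if found then found
              else if rp.1 == "Type" || rp.1 == "IP" then found
              else if rp.2 == dev then true else found) false
            if reverse_found then errors else errors ++ [pvMsgNoBack dev pc.1 pc.2]) errors =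
      errors ++ props.flatMap (fun pc => if pvSkip pc.1 then [] else pvEmitA slovar dev pc.1 pc.2) := by
    intro dev props
    induction props with
    | nil => simp
    | cons pc rest ih =>
      intro errors
      rw [List.foldl_cons, pvStepA, ih, List.flatMap_cons, List.append_assoc]
  have h2 : ∀ (l : List (String × List (String × String))) (errors : List String),
      l.foldl (fun errors dp =>
        dp.2.foldl (fun errors pc =>
          if pc.1 == "Type" || pc.1 == "IP" then errors
          else
            match (PySem.Dict.mk slovar).get? pc.2 with
            | none => errors ++ [pvMsgUnknown dp.1 pc.1 pc.2]
            | some props2 =>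
              let reverse_found := props2.foldl (fun found rp =>
                if found then found
                else if rp.1 == "Type" || rp.1 == "IP" then found
                else if rp.2 == dp.1 then true else found) false
              if reverse_found then errors else errors ++ [pvMsgNoBack dp.1 pc.1 pc.2]) errors) errors =
      errors ++ l.flatMap (fun dp => dp.2.flatMap (fun pc =>
        if pvSkip pc.1 then [] else pvEmitA slovar dp.1 pc.1 pc.2)) := by
    intro l
    induction l with
    | nil => simp
    | cons dp rest ih =>
      intro errors
      rw [List.foldl_cons, h1, ih, List.flatMap_cons, List.append_assoc]
  unfold check_bidirectional
  rw [h2, List.nil_append, pvEdges, List.flatMap_assoc]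
  apply List.flatMap_congr
  intro dp _
  rw [List.flatMap_assoc]
  apply List.flatMap_congr
  intro pc _
  rw [show (pc.1 != "Type" && pc.1 != "IP") = !pvSkip pc.1 from pvKeep_eq pc.1]
  cases pvSkip pc.1 <;> simp

-- generic flattening of B's report loop
lemma pvB_flatten {α : Type} (c1 c2 : α → Bool) (u n : α → String)
    (edges : List α) (errors : List String) :
    edges.foldl (fun errors e =>
      if c1 e then errors ++ [u e]
      else if c2 e then errors ++ [n e]
      else errors) errors =
    errors ++ edges.flatMap (fun e => if c1 e then [u e] else if c2 e then [n e] else []) := by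
  induction edges generalizing errors with
  | nil => simp
  | cons e rest ih =>
    rw [List.foldl_cons, List.flatMap_cons]
    cases h1 : c1 e
    · cases h2 : c2 e <;> simp [ih, List.append_assoc]
    · simp [ih, List.append_assoc]

-- B as a flatMap over the edges
lemma pvB_flat (slovar : List (String × List (String × String))) :
    check_bidirectional_alt slovar =
      (pvEdges slovar).flatMap (fun e =>
        if !(PySem.Dict.mk slovar).contains e.2.2 then [pvMsgUnknown e.1 e.2.1 e.2.2]
        else if PySem.Set.contains (pvOneWay slovar) (e.1, e.2.2) then [pvMsgNoBack e.1 e.2.1 e.2.2]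
        else []) := by
  unfold check_bidirectional_alt
  rw [pvB_flatten]
  rfl

-- per-edge agreement of the two emissions, under distinct device keys
lemma pvEmit_eq (slovar : List (String × List (String × String)))
    (hnd : (slovar.map Prod.fst).Nodup) (dev port cd : String)
    (he : (dev, cd) ∈ pvPairsL slovar) :
    pvEmitA slovar dev port cd =
      (if !(PySem.Dict.mk slovar).contains cd then [pvMsgUnknown dev port cd]
       else if PySem.Set.contains (pvOneWay slovar) (dev, cd) then [pvMsgNoBack dev port cd]
       else []) := by
  unfold pvEmitA
  cases hc : (PySem.Dict.mk slovar).contains cd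
  · rw [PySem.Dict.contains_eq_isSome_get?] at hc
    have hg : (PySem.Dict.mk slovar).get? cd = none := by
      cases h : (PySem.Dict.mk slovar).get? cd
      · rfl
      · rw [h] at hc; simp at hc
    rw [hg]
    simp
  · rw [PySem.Dict.contains_eq_isSome_get?] at hc
    obtain ⟨props2, hg⟩ := Option.isSome_iff_exists.mp hc
    rw [hg]
    simp only []
    rw [pvRev_any]
    simp only [Bool.false_or]
    have hany : props2.any (fun rp => !pvSkip rp.1 && rp.2 == dev)
        = decide ((cd, dev) ∈ pvPairsL slovar) := by
      rw [Bool.eq_iff_iff, List.any_eq_true, decide_eq_true_iff, pvMem_pairsL]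
      constructor
      · rintro ⟨rp, hrp, hpred⟩
        have hs : pvSkip rp.1 = false ∧ rp.2 = dev := by
          revert hpred; cases h : pvSkip rp.1 <;> simp
        exact ⟨(cd, props2), pvGet_mem _ _ _ hg, rp, hrp, hs.1, by rw [hs.2]⟩
      · rintro ⟨⟨d1, d2⟩, hdp, pc, hpc, hs, hx⟩
        have hx1 : cd = d1 := (Prod.ext_iff.mp hx).1
        have hx2 : dev = pc.2 := (Prod.ext_iff.mp hx).2
        have hgd : (PySem.Dict.mk slovar).get? cd = some d2 := by
          rw [hx1]; exact pvMem_get _ _ _ hnd hdp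
        rw [hg] at hgd
        obtain rfl := Option.some.inj hgd
        exact ⟨pc, hpc, by simp [hs, ← hx2]⟩
    have how : PySem.Set.contains (pvOneWay slovar) (dev, cd)
        = decide ((cd, dev) ∉ pvPairsL slovar) := by
      rw [Bool.eq_iff_iff, PySem.Set.contains_iff, pvMem_oneWay, decide_eq_true_iff]
      constructor
      · rintro ⟨_, h2⟩; exact h2
      · intro h2; exact ⟨he, h2⟩
    rw [hany, how]
    by_cases hrev : (cd, dev) ∈ pvPairsL slovar
    · simp [hrev]
    · simp [hrev]

-- ===== VERDICT (by name: the statement is the Claim_ definition above) =====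
theorem check_bidirectional_spec : Claim_equal_check_bidirectional := by
  intro slovar _ hpre
  unfold Spec_check_bidirectional
  rw [pvA_flat, pvB_flat]
  apply List.flatMap_congr
  intro e he
  exact pvEmit_eq slovar hpre e.1 e.2.1 e.2.2
    (List.mem_map.mpr ⟨e, he, rfl⟩)
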